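-- pv_equiv track=rewrite | github.com/shaxzod02/Simple-Website | efficient-algorithms/sublists.py | count_lists
-- ===== SOURCE A (Python) =====
-- def count_lists(numbers):
--     n = len(numbers)
--     a = b = -1           # a: start index of current run, b: start of previous run
--     result = 0           # This will hold the total count of valid sublists
--
--     for i in range(1, n):
--         # Check if current element is different from the previous one
--         if numbers[i] != numbers[i - 1]:
--             # If current element is different from the one at position a,
--             # it means we're starting a new run after a different run
--             if numbers[i] != numbers[a]:
--                 b = a    # Move b to a: track start of the previous different run
--             a = i - 1    # Start of new run is previous index (i - 1)
--
--         # For each position i, add the distance between a and b to the result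
--         result += a - b
--
--     return result
-- ===== SOURCE B (Python) =====
-- def count_lists(numbers):
--     n = len(numbers)
--     # First pass: maximal equal-value runs as (value, start index, length).
--     runs = []
--     i = 0
--     while i < n:
--         j = i + 1
--         while j < n and numbers[j] == numbers[i]:
--             j += 1
--         runs.append((numbers[i], i, j - i))
--         i = j
--     # Second pass over adjacent run pairs: run k contributes
--     # length_k * (start_k - 1 - b), where b is updated to the previous
--     # run's last index whenever run k's value differs from the value
--     # two runs back (pv; None before a value two back exists).
--     result = 0
--     b = -1
--     pv = None
--     for (pvn, ps, _), (v, s, length) in zip(runs, runs[1:]):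
--         if pv is not None and v != pv:
--             b = ps - 1
--         result += length * (s - 1 - b)
--         pv = pvn
--     return result
-- ===== Notes on version B (the rewrite author's own statement) =====
-- stated objective: alternative
-- what changed: Replaces A's single per-index loop with a two-pass run decomposition: first build the list of maximal equal-value runs (value, start, length), then fold over adjacent run pairs, adding length*(start-1-b) per run and updating b when a run's value differs from the value two runs back.
import Mathlib
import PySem

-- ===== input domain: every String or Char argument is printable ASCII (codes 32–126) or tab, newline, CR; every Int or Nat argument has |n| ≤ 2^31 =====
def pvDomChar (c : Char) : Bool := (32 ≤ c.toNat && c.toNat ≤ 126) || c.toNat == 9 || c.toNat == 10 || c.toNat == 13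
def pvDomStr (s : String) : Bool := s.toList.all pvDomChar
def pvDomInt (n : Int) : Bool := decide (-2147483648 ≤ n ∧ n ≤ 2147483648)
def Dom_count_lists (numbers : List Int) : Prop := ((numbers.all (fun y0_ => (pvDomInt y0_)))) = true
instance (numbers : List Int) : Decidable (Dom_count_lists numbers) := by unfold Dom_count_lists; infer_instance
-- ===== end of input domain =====

-- B re-implements A by a two-pass run decomposition (build maximal equal-value runs,
-- then fold over adjacent run pairs) instead of A's per-index loop; objective: alternative.

-- ===== PORT A =====
-- loop body of A: state (a, b, result), index i
def stepA (ns : List Int) : Int × Int × Int → Int → Int × Int × Int :=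
  fun (a, b, r) i =>
    if PySem.List.pyGetD ns i 0 ≠ PySem.List.pyGetD ns (i - 1) 0 then
      let b' := if PySem.List.pyGetD ns i 0 ≠ PySem.List.pyGetD ns a 0 then a else b
      (i - 1, b', r + ((i - 1) - b'))
    else
      (a, b, r + (a - b))

def count_lists (numbers : List Int) : Int :=
  ((PySem.List.pyRange 1 (numbers.length : Int) 1).foldl (stepA numbers) (-1, -1, 0)).2.2

-- ===== PORT B =====
-- inner while of B's first pass: first index ≥ j whose value differs from v (or n)
def runEnd (ns : List Int) (v : Int) (j : Nat) : Nat :=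
  if h : j < ns.length then
    if ns[j] = v then runEnd ns v (j + 1) else j
  else j
termination_by ns.length - j

theorem le_runEnd (ns : List Int) (v : Int) (j : Nat) : j ≤ runEnd ns v j := by
  fun_induction runEnd with
  | case1 j h heq ih => omega
  | case2 j h hne => omega
  | case3 j h => omega

-- outer while of B's first pass: the list of runs (value, start, length) from index i
def buildRuns (ns : List Int) (i : Nat) : List (Int × Int × Int) :=
  if h : i < ns.length then
    let j := runEnd ns ns[i] (i + 1)
    (ns[i], (i : Int), (j : Int) - (i : Int)) :: buildRuns ns j
  else []
termination_by ns.length - i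
decreasing_by
  have := le_runEnd ns ns[i] (i + 1)
  omega

-- B's second-pass loop body: state (b, pv, result), a pair of adjacent runs
def stepB : Int × Option Int × Int → (Int × Int × Int) × (Int × Int × Int) → Int × Option Int × Int :=
  fun (b, pv, r) ((pvn, ps, _), (v, s, len)) =>
    let b' := match pv with
      | some p => if v ≠ p then ps - 1 else b
      | none => b
    (b', some pvn, r + len * (s - 1 - b'))

def count_lists_alt (numbers : List Int) : Int :=
  let runs := buildRuns numbers 0
  ((runs.zip runs.tail).foldl stepB (-1, none, 0)).2.2

-- ===== PRECONDITION & SPEC =====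
def Spec_count_lists (numbers : List Int) (out : Int) : Prop := out = count_lists_alt numbers
instance (numbers : List Int) (out : Int) : Decidable (Spec_count_lists numbers out) := by unfold Spec_count_lists; infer_instance

-- ===== CLAIM (what is proved, stated in full; the proofs are below) =====
def Claim_equal_count_lists : Prop := ∀ (numbers : List Int), Dom_count_lists numbers → Spec_count_lists numbers (count_lists numbers)

-- ===== LEMMAS AND PROOFS =====

theorem runEnd_le (ns : List Int) (v : Int) (j : Nat) (hj : j ≤ ns.length) :
    runEnd ns v j ≤ ns.length := by
  fun_induction runEnd with
  | case1 j h heq ih => exact ih (by omega)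
  | case2 j h hne => omega
  | case3 j h => omega

theorem runEnd_val (ns : List Int) (v : Int) (j : Nat) :
    ∀ t, j ≤ t → t < runEnd ns v j → ∀ (h : t < ns.length), ns[t] = v := by
  fun_induction runEnd with
  | case1 j h heq ih =>
    intro t h1 h2 ht
    rcases Nat.eq_or_lt_of_le h1 with rfl | hlt
    · exact heq
    · exact ih t (by omega) h2 ht
  | case2 j h hne => intro t h1 h2 ht; omega
  | case3 j h => intro t h1 h2 ht; omega

theorem runEnd_boundary (ns : List Int) (v : Int) (j : Nat)
    (h : runEnd ns v j < ns.length) : ns[runEnd ns v j] ≠ v := by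
  fun_induction runEnd with
  | case1 j hj heq ih => exact ih h
  | case2 j hj hne => simpa using hne
  | case3 j hj => omega

theorem buildRuns_eq_cons (ns : List Int) (j : Nat) (h : j < ns.length) :
    buildRuns ns j =
      (ns[j], (j : Int), ((runEnd ns ns[j] (j + 1) : Nat) : Int) - (j : Int))
        :: buildRuns ns (runEnd ns ns[j] (j + 1)) := by
  rw [buildRuns]; simp [h]

theorem buildRuns_eq_nil (ns : List Int) (j : Nat) (h : ¬ j < ns.length) :
    buildRuns ns j = [] := by
  rw [buildRuns]; simp [h]

-- all indices of the run starting at j have value ns[j]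
theorem run_getD (ns : List Int) (j : Nat) (hj : j < ns.length) (t : Nat)
    (h1 : j ≤ t) (h2 : t < runEnd ns ns[j] (j + 1))
    (hle : runEnd ns ns[j] (j + 1) ≤ ns.length) :
    ns.getD t 0 = ns[j] := by
  have ht : t < ns.length := by omega
  rw [List.getD_eq_getElem ns 0 ht]
  rcases Nat.eq_or_lt_of_le h1 with rfl | hlt
  · rfl
  · exact runEnd_val ns ns[j] (j + 1) t (by omega) h2 ht

-- A's fold over the interior of a run: state (a,b) unchanged, adds L·(a−b)
theorem foldA_interior (ns : List Int) (L : Nat) :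
    ∀ (p a b r : Int),
      (∀ k : Nat, k < L →
        PySem.List.pyGetD ns (p + k) 0 = PySem.List.pyGetD ns (p + k - 1) 0) →
      (PySem.List.pyRange p (p + L) 1).foldl (stepA ns) (a, b, r)
        = (a, b, r + L * (a - b)) := by
  induction L with
  | zero =>
    intro p a b r _
    rw [PySem.List.pyRange_one_eq_nil (by simp)]
    simp
  | succ L ih =>
    intro p a b r h
    rw [PySem.List.pyRange_one_cons (by push_cast; omega)]
    have h0 := h 0 (by omega)
    simp only [Nat.cast_zero, add_zero] at h0
    have hstep : stepA ns (a, b, r) p = (a, b, r + (a - b)) := by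
      simp [stepA, h0]
    rw [List.foldl_cons, hstep]
    have hrange : p + ((L : Nat) + 1 : Nat) = (p + 1) + (L : Nat) := by push_cast; ring
    rw [hrange, ih (p + 1) a b (r + (a - b))
      (by intro k hk
          have hkk := h (k + 1) (by omega)
          push_cast at hkk
          have e1 : p + 1 + (k : Int) = p + ((k : Int) + 1) := by ring
          rw [e1]
          exact hkk)]
    push_cast
    ring_nf

-- A's fold across one whole run starting at boundary j: a becomes j-1, b updates once,
-- the run contributes (runEnd - j)·(j-1-b'), and the fold continues at the next boundary
theorem foldA_run (ns : List Int) (j : Nat) (h : j < ns.length) (hj1 : 1 ≤ j)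
    (pvn : Int) (hprev : ns.getD (j - 1) 0 = pvn) (hne : ns[j] ≠ pvn)
    (a b r : Int) :
    (PySem.List.pyRange (j : Int) (ns.length : Int) 1).foldl (stepA ns) (a, b, r)
      = (PySem.List.pyRange ((runEnd ns ns[j] (j + 1) : Nat) : Int) (ns.length : Int) 1).foldl
          (stepA ns)
          ((j : Int) - 1,
           if ns[j] ≠ PySem.List.pyGetD ns a 0 then a else b,
           r + (((runEnd ns ns[j] (j + 1) : Nat) : Int) - (j : Int)) *
               ((j : Int) - 1 - (if ns[j] ≠ PySem.List.pyGetD ns a 0 then a else b))) := by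
  set j' : Nat := runEnd ns ns[j] (j + 1) with hj'
  have hj'1 : j + 1 ≤ j' := le_runEnd ns ns[j] (j + 1)
  have hj'le : j' ≤ ns.length := runEnd_le ns ns[j] (j + 1) (by omega)
  set bA : Int := if ns[j] ≠ PySem.List.pyGetD ns a 0 then a else b with hbA
  have hc1 : PySem.List.pyGetD ns ((j : Nat) : Int) 0 = ns[j] := by
    rw [PySem.List.pyGetD_natCast]; exact List.getD_eq_getElem ns 0 h
  have hc2 : PySem.List.pyGetD ns (((j : Nat) : Int) - 1) 0 = pvn := by
    have e : ((j : Nat) : Int) - 1 = ((j - 1 : Nat) : Int) := by omega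
    rw [e, PySem.List.pyGetD_natCast]; exact hprev
  rw [PySem.List.pyRange_one_append (j : Int) (j' : Int) (ns.length : Int)
        (by omega) (by omega), List.foldl_append]
  congr 1
  rw [PySem.List.pyRange_one_cons (by omega : ((j : Nat) : Int) < (j' : Int)), List.foldl_cons]
  have hstep : stepA ns (a, b, r) ((j : Nat) : Int) = ((j : Int) - 1, bA, r + (((j : Int) - 1) - bA)) := by
    simp only [stepA, hc1, hc2]
    rw [if_pos hne]
  rw [hstep]
  have hK : (j' : Int) = ((j : Int) + 1) + ((j' - (j + 1) : Nat) : Int) := by omega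
  rw [hK, foldA_interior ns (j' - (j + 1)) ((j : Int) + 1) ((j : Int) - 1) bA _
    (by intro k hk
        have e1 : ((j : Int) + 1 + (k : Int)) = (((j + 1 + k : Nat) : Int)) := by omega
        have e2 : ((j : Int) + 1 + (k : Int) - 1) = (((j + k : Nat) : Int)) := by omega
        rw [e2, e1, PySem.List.pyGetD_natCast, PySem.List.pyGetD_natCast]
        rw [run_getD ns j h (j + 1 + k) (by omega) (by omega) hj'le,
            run_getD ns j h (j + k) (by omega) (by omega) hj'le])]
  have e3 : ((j' - (j + 1) : Nat) : Int) = (j' : Int) - (j : Int) - 1 := by omega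
  rw [e3]
  congr 1
  ring_nf

-- main invariant: from a run boundary j onward, A's index fold and B's run fold agree
theorem main_inv (ns : List Int) :
    ∀ (m j : Nat), ns.length - j = m →
    ∀ (ps pl b r : Int) (pv : Option Int) (pvn : Int),
      1 ≤ j → j ≤ ns.length →
      ns.getD (j - 1) 0 = pvn →
      (∀ h : j < ns.length, ns[j] ≠ pvn) →
      ((pv = none ∧ ps - 1 = b) ∨ pv = some (PySem.List.pyGetD ns (ps - 1) 0)) →
      ((PySem.List.pyRange (j : Int) (ns.length : Int) 1).foldl (stepA ns) (ps - 1, b, r)).2.2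
        = ((((pvn, ps, pl) :: buildRuns ns j).zip (buildRuns ns j)).foldl stepB (b, pv, r)).2.2 := by
  intro m
  induction m using Nat.strong_induction_on with
  | _ m ih =>
    intro j hm ps pl b r pv pvn hj1 hjlen hprev hne hconn
    by_cases h : j < ns.length
    · have hj'1 : j + 1 ≤ runEnd ns ns[j] (j + 1) := le_runEnd ns ns[j] (j + 1)
      have hj'le : runEnd ns ns[j] (j + 1) ≤ ns.length := runEnd_le ns ns[j] (j + 1) (by omega)
      rw [buildRuns_eq_cons ns j h, List.zip_cons_cons, List.foldl_cons,
          foldA_run ns j h hj1 pvn hprev (hne h) (ps - 1) b r]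
      have hprev' : ns.getD (runEnd ns ns[j] (j + 1) - 1) 0 = ns[j] :=
        run_getD ns j h (runEnd ns ns[j] (j + 1) - 1) (by omega) (by omega) hj'le
      have hne' : ∀ hh : runEnd ns ns[j] (j + 1) < ns.length,
          ns[runEnd ns ns[j] (j + 1)] ≠ ns[j] :=
        fun hh => runEnd_boundary ns ns[j] (j + 1) hh
      have hconn' : some pvn = some (PySem.List.pyGetD ns (((j : Nat) : Int) - 1) 0) := by
        have e : ((j : Nat) : Int) - 1 = ((j - 1 : Nat) : Int) := by omega
        rw [e, PySem.List.pyGetD_natCast, hprev]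
      rcases hconn with ⟨hpv, hab⟩ | hpv
      · subst hpv
        have hbA : (if ns[j] ≠ PySem.List.pyGetD ns (ps - 1) 0 then ps - 1 else b) = b := by
          split_ifs with hh
          · exact hab
          · rfl
        rw [hbA]
        simp only [stepB]
        exact ih (ns.length - runEnd ns ns[j] (j + 1)) (by omega)
          (runEnd ns ns[j] (j + 1)) rfl ((j : Nat) : Int) _ b _ (some pvn) ns[j]
          (by omega) hj'le hprev' hne' (Or.inr hconn')
      · subst hpv
        simp only [stepB]
        exact ih (ns.length - runEnd ns ns[j] (j + 1)) (by omega)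
          (runEnd ns ns[j] (j + 1)) rfl ((j : Nat) : Int) _
          (if ns[j] ≠ PySem.List.pyGetD ns (ps - 1) 0 then ps - 1 else b) _
          (some pvn) ns[j] (by omega) hj'le hprev' hne' (Or.inr hconn')
    · have hj : j = ns.length := by omega
      rw [buildRuns_eq_nil ns j h]
      rw [PySem.List.pyRange_one_eq_nil (by omega)]
      simp

-- ===== VERDICT (by name: the statement is the Claim_ definition above) =====
theorem count_lists_spec : Claim_equal_count_lists := by
  intro ns _
  unfold Spec_count_lists count_lists count_lists_alt
  by_cases hlen : ns.length = 0
  · rw [PySem.List.pyRange_one_eq_nil (by omega), buildRuns_eq_nil ns 0 (by omega)]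
    simp
  · have h0 : 0 < ns.length := by omega
    have hj₁1 : 1 ≤ runEnd ns ns[0] (0 + 1) := le_runEnd ns ns[0] (0 + 1)
    have hj₁le : runEnd ns ns[0] (0 + 1) ≤ ns.length := runEnd_le ns ns[0] (0 + 1) (by omega)
    rw [buildRuns_eq_cons ns 0 h0]
    simp only [Nat.cast_zero, List.tail_cons]
    rw [PySem.List.pyRange_one_append 1 ((runEnd ns ns[0] (0 + 1) : Nat) : Int)
          (ns.length : Int) (by omega) (by omega), List.foldl_append]
    have hint := foldA_interior ns (runEnd ns ns[0] (0 + 1) - 1) 1 (-1) (-1) 0 (by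
        intro k hk
        have e1 : (1 : Int) + (k : Int) = ((1 + k : Nat) : Int) := by omega
        have e2 : (1 : Int) + (k : Int) - 1 = ((k : Nat) : Int) := by omega
        rw [e2, e1, PySem.List.pyGetD_natCast, PySem.List.pyGetD_natCast,
            run_getD ns 0 h0 (1 + k) (by omega) (by omega) hj₁le,
            run_getD ns 0 h0 k (by omega) (by omega) hj₁le])
    rw [show (1 : Int) + ((runEnd ns ns[0] (0 + 1) - 1 : Nat) : Int)
          = ((runEnd ns ns[0] (0 + 1) : Nat) : Int) from by omega] at hint
    have hr0 : (0 : Int) + ((runEnd ns ns[0] (0 + 1) - 1 : Nat) : Int) * (-1 - (-1)) = 0 := by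
      ring
    rw [hr0] at hint
    rw [hint]
    have hprev : ns.getD (runEnd ns ns[0] (0 + 1) - 1) 0 = ns[0] :=
      run_getD ns 0 h0 (runEnd ns ns[0] (0 + 1) - 1) (by omega) (by omega) hj₁le
    have hmain := main_inv ns (ns.length - runEnd ns ns[0] (0 + 1))
      (runEnd ns ns[0] (0 + 1)) rfl 0 (((runEnd ns ns[0] (0 + 1) : Nat) : Int) - 0)
      (-1) 0 none ns[0] (by omega) hj₁le hprev
      (fun hh => runEnd_boundary ns ns[0] (0 + 1) hh)
      (Or.inl ⟨rfl, by norm_num⟩)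
    rw [show ((0 : Int) - 1) = -1 from by norm_num] at hmain
    exact hmain
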